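-- pv_equiv track=rewrite | github.com/knarula2099/CSE156-Project | backend/services/rag_service.py | select_context_chunks
-- ===== SOURCE A (Python) =====
-- from typing import Dict, List, Any, Optional, Tuple
--
-- def select_context_chunks(documents: List[str], metadatas: List[Dict],
--                         max_tokens: int = 3000) -> Tuple[List[str], List[Dict]]:
--     """
--     Select the most informative chunks of documents to use as context.
--
--     Args:
--         documents: List of document texts
--         metadatas: List of document metadata
--         max_tokens: Maximum number of tokens to include in context
--
--     Returns:
--         Tuple of (selected document chunks, corresponding metadata)
--     """
--     if not documents:
--         return [], []
--
--     # Estimate tokens (rough approximation: 4 chars ≈ 1 token)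
--     doc_token_counts = [len(doc) // 4 for doc in documents]
--
--     # If everything fits, return all
--     if sum(doc_token_counts) <= max_tokens:
--         return documents, metadatas
--
--     # Otherwise, prioritize and select chunks
--     selected_docs = []
--     selected_meta = []
--     token_count = 0
--
--     # Always include the full first document (assumed most relevant)
--     selected_docs.append(documents[0])
--     selected_meta.append(metadatas[0])
--     token_count += doc_token_counts[0]
--
--     # For remaining documents, take introductory chunks
--     for i in range(1, len(documents)):
--         # Extract introduction (first paragraph or two)
--         paragraphs = documents[i].split('\n\n')
--         intro = paragraphs[0]
--         if len(paragraphs) > 1: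
--             intro += '\n\n' + paragraphs[1]
--
--         # Estimate tokens for intro
--         intro_tokens = len(intro) // 4
--
--         # If it fits, add it
--         if token_count + intro_tokens <= max_tokens:
--             selected_docs.append(intro)
--             selected_meta.append(metadatas[i])
--             token_count += intro_tokens
--         else:
--             # If even first paragraph doesn't fit, we're done
--             break
--
--     return selected_docs, selected_meta
-- ===== SOURCE B (Python) =====
-- from typing import Dict, List, Any, Optional, Tuple
--
-- def _intro(doc):
--     ps = doc.split('\n\n')
--     return ps[0] if len(ps) == 1 else ps[0] + '\n\n' + ps[1]
--
-- def _bisect_right(a, x):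
--     # rightmost insertion point for x in the nondecreasing list a
--     lo, hi = 0, len(a)
--     while lo < hi:
--         mid = (lo + hi) // 2
--         if a[mid] <= x:
--             lo = mid + 1
--         else:
--             hi = mid
--     return lo
--
-- def select_context_chunks(documents: List[str], metadatas: List[Dict],
--                         max_tokens: int = 3000) -> Tuple[List[str], List[Dict]]:
--     if not documents:
--         return [], []
--     token_counts = [len(d) // 4 for d in documents]
--     if sum(token_counts) <= max_tokens:
--         return documents, metadatas
--     intros = [_intro(d) for d in documents[1:]]
--     totals = []
--     run = token_counts[0]
--     for s in intros:
--         run += len(s) // 4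
--         totals.append(run)
--     # Each intro cost is >= 0, so `totals` is nondecreasing; the greedy break point
--     # is therefore the rightmost insertion point of max_tokens, found by binary search.
--     k = _bisect_right(totals, max_tokens)
--     return [documents[0]] + intros[:k], metadatas[:1 + k]
-- ===== Notes on version B (the rewrite author's own statement) =====
-- stated objective: alternative
-- what changed: A interleaves intro extraction, budget checking and doc/meta appending in one break-loop indexing metadatas; B builds the intro list and its running token totals, then (since intro costs are nonnegative, totals is nondecreasing) finds the cutoff k by BINARY SEARCH (hand-written bisect_right) and returns the slices [documents[0]]+intros[:k] and metadatas[:1+k].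
-- outside the precondition, e.g. on select_context_chunks(['aaaaaaaa', 'bbbb'], [{}], 1): A returns (['aaaaaaaa'], [{}]), B returns (['aaaaaaaa'], [{}])
import Mathlib
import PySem

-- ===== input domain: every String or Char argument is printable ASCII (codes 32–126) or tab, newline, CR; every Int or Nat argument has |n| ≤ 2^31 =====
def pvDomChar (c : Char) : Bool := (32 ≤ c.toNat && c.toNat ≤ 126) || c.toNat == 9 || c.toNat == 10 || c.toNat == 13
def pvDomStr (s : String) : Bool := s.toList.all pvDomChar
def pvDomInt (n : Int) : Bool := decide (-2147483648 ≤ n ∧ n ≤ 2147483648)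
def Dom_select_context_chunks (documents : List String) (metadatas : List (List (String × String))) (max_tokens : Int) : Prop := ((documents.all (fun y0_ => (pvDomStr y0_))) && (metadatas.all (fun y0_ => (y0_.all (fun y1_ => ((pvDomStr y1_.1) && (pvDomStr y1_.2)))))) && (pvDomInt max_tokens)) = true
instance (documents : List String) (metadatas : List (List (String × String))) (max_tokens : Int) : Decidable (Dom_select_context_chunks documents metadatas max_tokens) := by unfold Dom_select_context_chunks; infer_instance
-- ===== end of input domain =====

-- B replaces A's interleaved break-loop by staged passes: build the intros and their running
-- token totals, then (totals is nondecreasing) find the cutoff by binary search and slice.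

-- ===== PORT A =====

-- len(doc) // 4  (token estimate used by both programs)
def pvCost (s : String) : Int := PySem.Int.floordiv (PySem.Str.len s) 4

-- paragraphs = doc.split('\n\n'); intro = paragraphs[0] (+ '\n\n' + paragraphs[1] if present).
-- split? with the non-empty separator "\n\n" never returns none and its result is non-empty,
-- so the getD defaults are never taken.
def pvIntro (doc : String) : String :=
  let paragraphs := (PySem.Str.split? doc "\n\n").getD []
  match paragraphs with
  | p0 :: p1 :: _ => p0 ++ "\n\n" ++ p1
  | [p0] => p0
  | [] => ""

-- A's for-loop over i in range(1, len(documents)) with its break, recursing over the two tails in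
-- step; when metadatas runs out before documents while an intro still fits, Python A raises
-- IndexError — those inputs are outside Pre_ and the ([], []) fallback there is unclaimed.
def pvLoopA (max_tokens : Int) : List String → List (List (String × String)) → Int →
    List String × List (List (String × String))
  | d :: ds, m :: ms, token_count =>
    let intro := pvIntro d
    let intro_tokens := pvCost intro
    if token_count + intro_tokens ≤ max_tokens then
      let r := pvLoopA max_tokens ds ms (token_count + intro_tokens)
      (intro :: r.1, m :: r.2)
    else ([], [])
  | _, _, _ => ([], [])

def select_context_chunks (documents : List String) (metadatas : List (List (String × String))) (max_tokens : Int) : List String × (List (List (String × String))) :=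
  if documents.isEmpty then ([], [])
  else
    let doc_token_counts := documents.map pvCost
    if doc_token_counts.sum ≤ max_tokens then (documents, metadatas)
    else
      -- documents[0]; metadatas[0] raises in Python when metadatas = [], which Pre_ excludes
      let r := pvLoopA max_tokens (documents.drop 1) (metadatas.drop 1)
                 (doc_token_counts.headD 0)
      (documents.headD "" :: r.1, metadatas.headD [] :: r.2)

-- ===== PORT B =====

-- Source B's running-totals loop: totals after adding each intro's cost in turn
def pvTotals (run : Int) : List String → List Int
  | [] => []
  | s :: ss => (run + pvCost s) :: pvTotals (run + pvCost s) ss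

-- Source B's hand-written _bisect_right while-loop (a[mid] read with getD; mid is always in range)
def pvBisect (a : List Int) (x : Int) (lo hi : Nat) : Nat :=
  if _h : lo < hi then
    let mid := (lo + hi) / 2
    if a.getD mid 0 ≤ x then pvBisect a x (mid + 1) hi else pvBisect a x lo mid
  else lo
termination_by hi - lo
decreasing_by all_goals omega

def select_context_chunks_alt (documents : List String) (metadatas : List (List (String × String))) (max_tokens : Int) : List String × (List (List (String × String))) :=
  if documents.isEmpty then ([], [])
  else
    let token_counts := documents.map pvCost
    if token_counts.sum ≤ max_tokens then (documents, metadatas)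
    else
      let intros := (documents.drop 1).map pvIntro
      let totals := pvTotals (token_counts.headD 0) intros
      let k := pvBisect totals max_tokens 0 totals.length
      (documents.headD "" :: intros.take k, metadatas.take (1 + k))

-- ===== PRECONDITION & SPEC =====
-- Pre_ excludes inputs where some document must be truncated (not everything fits) but metadatas is
-- shorter than documents: there Python A indexes metadatas[i] and may raise IndexError; where A
-- happens to return before running off metadatas it returns the same prefix B's slices produce.
def Pre_select_context_chunks (documents : List String) (metadatas : List (List (String × String))) (max_tokens : Int) : Prop :=
  documents = [] ∨ (documents.map pvCost).sum ≤ max_tokens ∨ documents.length ≤ metadatas.length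
instance (documents : List String) (metadatas : List (List (String × String))) (max_tokens : Int) : Decidable (Pre_select_context_chunks documents metadatas max_tokens) := by unfold Pre_select_context_chunks; infer_instance

def pvWitness_select_context_chunks : List String × (List (List (String × String))) × Int :=
  (["aaaaaaaa", "bb\n\ncc\n\ndd", "eeee"], [[("s", "0")], [("s", "1")], [("s", "2")]], 3)

def Spec_select_context_chunks (documents : List String) (metadatas : List (List (String × String))) (max_tokens : Int) (out : List String × (List (List (String × String)))) : Prop := out = select_context_chunks_alt documents metadatas max_tokens
instance (documents : List String) (metadatas : List (List (String × String))) (max_tokens : Int) (out : List String × (List (List (String × String)))) : Decidable (Spec_select_context_chunks documents metadatas max_tokens out) := by unfold Spec_select_context_chunks; infer_instance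

-- ===== CLAIM (what is proved, stated in full; the proofs are below) =====
def Claim_equal_select_context_chunks : Prop := ∀ (documents : List String) (metadatas : List (List (String × String))) (max_tokens : Int), Dom_select_context_chunks documents metadatas max_tokens → Pre_select_context_chunks documents metadatas max_tokens → Spec_select_context_chunks documents metadatas max_tokens (select_context_chunks documents metadatas max_tokens)

-- ===== LEMMAS AND PROOFS =====

theorem pvCost_nonneg (s : String) : 0 ≤ pvCost s := by
  unfold pvCost
  rw [PySem.Int.floordiv_eq_ediv_of_pos (by norm_num)]
  apply Int.ediv_nonneg _ (by norm_num)
  simp [PySem.Str.len]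

-- every later running total stays at or above the starting value
theorem pvTotals_ge (ss : List String) : ∀ (run : Int) (t : Int), t ∈ pvTotals run ss → run ≤ t := by
  induction ss with
  | nil => intro run t h; simp [pvTotals] at h
  | cons s ss ih =>
    intro run t h
    have hc := pvCost_nonneg s
    simp only [pvTotals, List.mem_cons] at h
    rcases h with h | h
    · omega
    · have := ih (run + pvCost s) t h; omega

-- the running totals are nondecreasing
theorem pvTotals_pairwise (ss : List String) : ∀ (run : Int), (pvTotals run ss).Pairwise (· ≤ ·) := by
  induction ss with
  | nil => intro run; simp [pvTotals]
  | cons s ss ih =>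
    intro run
    simp only [pvTotals, List.pairwise_cons]
    exact ⟨fun t ht => pvTotals_ge ss (run + pvCost s) t ht, ih _⟩

theorem pvTotals_mono (ss : List String) (run : Int) (i j : Nat) (hij : i ≤ j)
    (hj : j < (pvTotals run ss).length) :
    (pvTotals run ss).getD i 0 ≤ (pvTotals run ss).getD j 0 := by
  rcases Nat.lt_or_ge i j with h | h
  · rw [List.getD_eq_getElem _ 0 (by omega), List.getD_eq_getElem _ 0 hj]
    exact List.pairwise_iff_getElem.mp (pvTotals_pairwise ss run) i j (by omega) hj h
  · have : i = j := by omega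
    subst this; exact le_refl _

-- invariant of Source B's binary-search loop
theorem pvBisect_spec (a : List Int) (x : Int)
    (hmono : ∀ i j, i ≤ j → j < a.length → a.getD i 0 ≤ a.getD j 0) :
    ∀ (n lo hi : Nat), hi - lo = n → lo ≤ hi → hi ≤ a.length →
      (∀ i, i < lo → a.getD i 0 ≤ x) →
      (∀ i, hi ≤ i → i < a.length → x < a.getD i 0) →
      (∀ i, i < pvBisect a x lo hi → a.getD i 0 ≤ x) ∧
      (∀ i, pvBisect a x lo hi ≤ i → i < a.length → x < a.getD i 0) ∧
      pvBisect a x lo hi ≤ hi := by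
  intro n
  induction n using Nat.strong_induction_on with
  | _ n ih =>
    intro lo hi hn hlohi hlen hlow hhigh
    rw [pvBisect]
    by_cases h : lo < hi
    · simp only [h, dif_pos]
      set mid := (lo + hi) / 2 with hmid
      have hmb : lo ≤ mid ∧ mid < hi := by constructor <;> omega
      by_cases hcmp : a.getD mid 0 ≤ x
      · simp only [hcmp, if_pos]
        have hr := ih (hi - (mid + 1)) (by omega) (mid + 1) hi rfl (by omega) hlen
          (fun i hi' => by
            rcases Nat.lt_or_ge i lo with hil | hil
            · exact hlow i hil
            · exact le_trans (hmono i mid (by omega) (by omega)) hcmp)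
          hhigh
        exact ⟨hr.1, hr.2.1, le_trans hr.2.2 (le_refl hi)⟩
      · simp only [hcmp, if_neg, not_false_iff]
        have hr := ih (mid - lo) (by omega) lo mid rfl (by omega) (by omega) hlow
          (fun i hmi hil =>
            lt_of_lt_of_le (by omega : x < a.getD mid 0) (hmono mid i hmi (by omega)))
        exact ⟨hr.1, hr.2.1, by omega⟩
    · simp only [h, dif_neg, not_false_iff]
      have : hi = lo := by omega
      exact ⟨hlow, fun i hli hil => hhigh i (by omega) hil, by omega⟩

-- for a nondecreasing list, bisect_right over the whole list equals the linear first-exceed index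
theorem pvBisect_eq_findIdx (a : List Int) (x : Int)
    (hmono : ∀ i j, i ≤ j → j < a.length → a.getD i 0 ≤ a.getD j 0) :
    pvBisect a x 0 a.length = a.findIdx (fun t => x < t) := by
  obtain ⟨h1, h2, h3⟩ := pvBisect_spec a x hmono (a.length - 0) 0 a.length rfl (by omega)
    (le_refl _) (fun i hi => by omega) (fun i hi hil => by omega)
  set b := pvBisect a x 0 a.length with hb
  set k := a.findIdx (fun t => x < t) with hk
  have hkl : k ≤ a.length := List.findIdx_le_length
  rcases Nat.lt_trichotomy b k with h | h | h
  · -- b < k ≤ len: spec says x < a[b], findIdx says a[b] ≤ x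
    have hbl : b < a.length := by omega
    have := h2 b (le_refl _) hbl
    have hf : (fun t => decide (x < t)) a[b] = false := List.not_of_lt_findIdx h
    simp only [decide_eq_false_iff_not, not_lt] at hf
    rw [List.getD_eq_getElem _ 0 hbl] at this
    omega
  · exact h
  · -- k < b ≤ len: findIdx says x < a[k], spec says a[k] ≤ x
    have hkl' : k < a.length := by omega
    have hf : (fun t => decide (x < t)) a[k] = true := List.findIdx_getElem (w := hkl')
    simp only [decide_eq_true_eq] at hf
    have := h1 k h
    rw [List.getD_eq_getElem _ 0 hkl'] at this
    omega

-- A's break-loop returns exactly the first-k intros and metadatas, k being the first-exceed index.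
theorem pvLoopA_eq (max_tokens : Int) :
    ∀ (ds : List String) (ms : List (List (String × String))) (tc : Int),
      ds.length ≤ ms.length →
      pvLoopA max_tokens ds ms tc =
        ((ds.map pvIntro).take ((pvTotals tc (ds.map pvIntro)).findIdx (fun t => max_tokens < t)),
         ms.take ((pvTotals tc (ds.map pvIntro)).findIdx (fun t => max_tokens < t))) := by
  intro ds
  induction ds with
  | nil => intro ms tc _; simp [pvLoopA, pvTotals]
  | cons d ds ih =>
    intro ms tc hlen
    cases ms with
    | nil => simp at hlen
    | cons m ms =>
      simp only [List.length_cons, Nat.add_le_add_iff_right] at hlen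
      simp only [pvLoopA, pvTotals, List.map_cons, List.findIdx_cons]
      by_cases h : tc + pvCost (pvIntro d) ≤ max_tokens
      · have hnot : (max_tokens < tc + pvCost (pvIntro d)) = False := by
          simp; omega
        rw [ih ms (tc + pvCost (pvIntro d)) hlen]
        simp [h, hnot, List.take_succ_cons]
      · have hyes : (max_tokens < tc + pvCost (pvIntro d)) = True := by
          simp; omega
        simp [h, hyes]

-- ===== VERDICT (by name: the statement is the Claim_ definition above) =====
theorem select_context_chunks_spec : Claim_equal_select_context_chunks := by
  intro documents metadatas max_tokens _ hpre
  unfold Spec_select_context_chunks select_context_chunks select_context_chunks_alt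
  cases documents with
  | nil => simp
  | cons d0 docs =>
    simp only [List.isEmpty_cons, Bool.false_eq_true, if_false]
    by_cases hfit : ((d0 :: docs).map pvCost).sum ≤ max_tokens
    · simp only [List.map_cons, List.sum_cons] at hfit ⊢
      rw [if_pos hfit, if_pos hfit]
    · simp only [hfit, if_false]
      rcases hpre with h | h | h
      · exact absurd h (by simp)
      · exact absurd h hfit
      · cases metadatas with
        | nil => simp at h
        | cons m0 ms =>
          simp only [List.length_cons, Nat.add_le_add_iff_right] at h
          rw [pvLoopA_eq max_tokens _ _ _ (by simpa using h)]
          rw [pvBisect_eq_findIdx _ max_tokens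
            (pvTotals_mono ((((d0 :: docs).drop 1).map pvIntro)) _)]
          simp only [List.headD_cons, Nat.add_comm 1, List.take_succ_cons, List.drop_succ_cons, List.drop_zero]
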